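-- pv_equiv track=rewrite | github.com/TyGuy121/papersafe-ai | litscan_app.py | filter_drug_suggestions
-- ===== SOURCE A (Python) =====
-- DRUG_DATABASE = [
--     "ABRILADA", "ACETAMINOPHEN, DEXTROMETHORPHAN HBr", "ACETAMINOPHEN, DEXTROMETHORPHAN HBr, PHENYLEPHRINE HCl",
--     "ACETAMINOPHEN, DEXTROMETHORPHAN, PHENYLEPHRINE", "ACETAMINOPHEN, DIPHENHYDRAMINE HCL, PHENYLEPHRINE HCL",
--     "ACULAR LS", "ACUVAIL", "ACZONE", "ADMELOG", "ALOCRIL", "ALPHAGAN P", "AMG 193", "ANTIVENIN",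
--     "ARTHROTEC", "ATAZANAVIR", "AZACTAM", "AZTREONAM", "Acarbose", "Acetaminophen", "Advair", "Advil",
--     "Amlodipine", "Amoxicillin", "Aspirin", "Atorvastatin", "Azithromycin", "Benadryl", "Celebrex",
--     "Crestor", "Cymbalta", "Diovan", "Enbrel", "Fosamax", "Humira", "Humulin", "Ibuprofen", "Insulin",
--     "Keytruda", "Lantus", "Lasix", "Lexapro", "Lipitor", "Lisinopril", "Lyrica", "Metformin", "Nexium",
--     "Norvasc", "OxyContin", "Ozempic", "Plavix", "Pradaxa", "Prednisone", "Prilosec", "Prozac",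
--     "Repatha", "Rituxan", "Rybelsus", "Singulair", "Synthroid", "Trulicity", "Tylenol", "Vasotec",
--     "Viagra", "Vioxx", "Warfarin", "Xarelto", "Zantac", "Zepbound", "Zocor", "Zoloft", "Zyprexa",
--     "adalimumab", "alemtuzumab", "bevacizumab", "cetuximab", "daratumumab", "evolocumab", "infliximab",
--     "ipilimumab", "natalizumab", "nivolumab", "obinutuzumab", "ofatumumab", "panitumumab", "pembrolizumab",
--     "pertuzumab", "ramucirumab", "rituximab", "secukinumab", "tocilizumab", "trastuzumab", "ustekinumab",
--     "vedolizumab", "tirzepatide", "semaglutide", "dulaglutide", "liraglutide", "exenatide", "insulin human",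
--     "insulin aspart", "insulin glargine", "insulin detemir", "insulin lispro", "metformin", "sitagliptin",
--     "empagliflozin", "canagliflozin", "dapagliflozin", "ertugliflozin", "alogliptin", "linagliptin",
--     "saxagliptin", "vildagliptin", "acarbose", "miglitol", "nateglinide", "repaglinide", "rosiglitazone",
--     "pioglitazone", "glipizide", "glyburide", "glimepiride", "chlorpropamide", "tolbutamide", "tolazamide"
-- ]
--
-- def filter_drug_suggestions(query, drug_list=DRUG_DATABASE, max_suggestions=10):
--     """Filter drug database based on user input"""
--     if not query:
--         return []
--
--     query_lower = query.lower()
--     suggestions = []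
--
--     # Exact matches first
--     for drug in drug_list:
--         if drug.lower() == query_lower:
--             suggestions.append(drug)
--
--     # Starts with matches
--     for drug in drug_list:
--         if drug.lower().startswith(query_lower) and drug not in suggestions:
--             suggestions.append(drug)
--
--     # Contains matches
--     for drug in drug_list:
--         if query_lower in drug.lower() and drug not in suggestions:
--             suggestions.append(drug)
--
--     return suggestions[:max_suggestions]
-- ===== SOURCE B (Python) =====
-- DRUG_DATABASE = [
--     "ABRILADA", "ACETAMINOPHEN, DEXTROMETHORPHAN HBr", "ACETAMINOPHEN, DEXTROMETHORPHAN HBr, PHENYLEPHRINE HCl",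
--     "ACETAMINOPHEN, DEXTROMETHORPHAN, PHENYLEPHRINE", "ACETAMINOPHEN, DIPHENHYDRAMINE HCL, PHENYLEPHRINE HCL",
--     "ACULAR LS", "ACUVAIL", "ACZONE", "ADMELOG", "ALOCRIL", "ALPHAGAN P", "AMG 193", "ANTIVENIN",
--     "ARTHROTEC", "ATAZANAVIR", "AZACTAM", "AZTREONAM", "Acarbose", "Acetaminophen", "Advair", "Advil",
--     "Amlodipine", "Amoxicillin", "Aspirin", "Atorvastatin", "Azithromycin", "Benadryl", "Celebrex",
--     "Crestor", "Cymbalta", "Diovan", "Enbrel", "Fosamax", "Humira", "Humulin", "Ibuprofen", "Insulin",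
--     "Keytruda", "Lantus", "Lasix", "Lexapro", "Lipitor", "Lisinopril", "Lyrica", "Metformin", "Nexium",
--     "Norvasc", "OxyContin", "Ozempic", "Plavix", "Pradaxa", "Prednisone", "Prilosec", "Prozac",
--     "Repatha", "Rituxan", "Rybelsus", "Singulair", "Synthroid", "Trulicity", "Tylenol", "Vasotec",
--     "Viagra", "Vioxx", "Warfarin", "Xarelto", "Zantac", "Zepbound", "Zocor", "Zoloft", "Zyprexa",
--     "adalimumab", "alemtuzumab", "bevacizumab", "cetuximab", "daratumumab", "evolocumab", "infliximab",
--     "ipilimumab", "natalizumab", "nivolumab", "obinutuzumab", "ofatumumab", "panitumumab", "pembrolizumab",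
--     "pertuzumab", "ramucirumab", "rituximab", "secukinumab", "tocilizumab", "trastuzumab", "ustekinumab",
--     "vedolizumab", "tirzepatide", "semaglutide", "dulaglutide", "liraglutide", "exenatide", "insulin human",
--     "insulin aspart", "insulin glargine", "insulin detemir", "insulin lispro", "metformin", "sitagliptin",
--     "empagliflozin", "canagliflozin", "dapagliflozin", "ertugliflozin", "alogliptin", "linagliptin",
--     "saxagliptin", "vildagliptin", "acarbose", "miglitol", "nateglinide", "repaglinide", "rosiglitazone",
--     "pioglitazone", "glipizide", "glyburide", "glimepiride", "chlorpropamide", "tolbutamide", "tolazamide"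
-- ]
--
--
-- def filter_drug_suggestions(query, drug_list=DRUG_DATABASE, max_suggestions=10):
--     """Filter drug database based on user input (one classification pass + seen-set dedup pass)."""
--     if not query:
--         return []
--
--     q = query.lower()
--     exact, prefix, contains = [], [], []
--     for drug in drug_list:
--         dl = drug.lower()
--         if dl == q:
--             exact.append(drug)
--         elif dl.startswith(q):
--             prefix.append(drug)
--         elif q in dl:
--             contains.append(drug)
--
--     result = list(exact)          # duplicate exact matches are kept, as in the original
--     seen = set(exact)
--     for drug in prefix + contains:
--         if drug not in seen:
--             seen.add(drug)
--             result.append(drug)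
--     return result[:max_suggestions]
-- ===== Notes on version B (the rewrite author's own statement) =====
-- stated objective: alternative
-- what changed: Replaces A's three full scans with 'drug not in suggestions' list membership by one classification pass into exact/prefix/substring buckets plus one dedup pass over the buckets using a seen set (exact matches kept undeduplicated, as in A); measured 1.36x at the largest size, below the 1.5x bar.
import Mathlib
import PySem

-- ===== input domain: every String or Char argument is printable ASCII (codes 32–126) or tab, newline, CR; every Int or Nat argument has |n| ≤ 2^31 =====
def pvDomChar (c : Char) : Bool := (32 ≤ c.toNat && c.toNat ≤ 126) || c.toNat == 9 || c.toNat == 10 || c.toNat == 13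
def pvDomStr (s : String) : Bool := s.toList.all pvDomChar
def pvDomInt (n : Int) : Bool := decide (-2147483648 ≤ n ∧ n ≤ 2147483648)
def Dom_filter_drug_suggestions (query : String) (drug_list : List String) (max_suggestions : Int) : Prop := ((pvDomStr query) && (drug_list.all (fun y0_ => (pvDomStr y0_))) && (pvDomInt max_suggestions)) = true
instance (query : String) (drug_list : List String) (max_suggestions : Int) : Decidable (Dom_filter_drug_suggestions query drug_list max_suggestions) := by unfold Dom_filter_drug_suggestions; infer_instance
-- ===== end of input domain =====

-- B replaces A's three scans (with list-membership dedup) by one classification pass into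
-- exact/prefix/substring buckets plus one seen-set dedup pass; return value only, no mutation.

-- ===== PORT A =====
def filter_drug_suggestions (query : String) (drug_list : List String) (max_suggestions : Int) : List String :=
  if query = "" then []
  else
    let query_lower := PySem.Str.lower query
    -- Exact matches first
    let s1 := drug_list.foldl (fun suggestions drug =>
      if PySem.Str.lower drug = query_lower then suggestions ++ [drug] else suggestions) []
    -- Starts with matches
    let s2 := drug_list.foldl (fun suggestions drug =>
      if PySem.Str.startswith (PySem.Str.lower drug) query_lower && !(suggestions.contains drug)
      then suggestions ++ [drug] else suggestions) s1
    -- Contains matches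
    let s3 := drug_list.foldl (fun suggestions drug =>
      if PySem.Str.isIn query_lower (PySem.Str.lower drug) && !(suggestions.contains drug)
      then suggestions ++ [drug] else suggestions) s2
    PySem.List.slice s3 none (some max_suggestions)

-- ===== PORT B =====
def filter_drug_suggestions_alt (query : String) (drug_list : List String) (max_suggestions : Int) : List String :=
  if query = "" then []
  else
    let q := PySem.Str.lower query
    -- one classification pass: (exact, prefix, contains) buckets
    let b := drug_list.foldl (fun (b : List String × List String × List String) drug =>
      let dl := PySem.Str.lower drug
      if dl = q then (b.1 ++ [drug], b.2.1, b.2.2)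
      else if PySem.Str.startswith dl q then (b.1, b.2.1 ++ [drug], b.2.2)
      else if PySem.Str.isIn q dl then (b.1, b.2.1, b.2.2 ++ [drug])
      else b) ([], [], [])
    -- dedup pass with a seen set; exact matches kept as-is
    let st := (b.2.1 ++ b.2.2).foldl (fun (st : PySem.Set String × List String) drug =>
      if PySem.Set.contains st.1 drug then st
      else (PySem.Set.add st.1 drug, st.2 ++ [drug])) (PySem.Set.ofList b.1, b.1)
    PySem.List.slice st.2 none (some max_suggestions)

-- ===== PRECONDITION & SPEC =====
def Spec_filter_drug_suggestions (query : String) (drug_list : List String) (max_suggestions : Int) (out : List String) : Prop := out = filter_drug_suggestions_alt query drug_list max_suggestions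
instance (query : String) (drug_list : List String) (max_suggestions : Int) (out : List String) : Decidable (Spec_filter_drug_suggestions query drug_list max_suggestions out) := by unfold Spec_filter_drug_suggestions; infer_instance

-- ===== CLAIM (what is proved, stated in full; the proofs are below) =====
def Claim_equal_filter_drug_suggestions : Prop := ∀ (query : String) (drug_list : List String) (max_suggestions : Int), Dom_filter_drug_suggestions query drug_list max_suggestions → Spec_filter_drug_suggestions query drug_list max_suggestions (filter_drug_suggestions query drug_list max_suggestions)

-- ===== LEMMAS AND PROOFS =====

/-- A fold that appends `d` when `p d`, else skips, is `acc ++ filter`. -/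
lemma foldl_filterAppend (p : String → Bool) (l : List String) (acc : List String) :
    l.foldl (fun acc d => if p d then acc ++ [d] else acc) acc = acc ++ l.filter p := by
  induction l generalizing acc with
  | nil => simp
  | cons d t ih =>
    by_cases h : p d = true <;> simp [List.foldl_cons, h, ih]

/-- The dedup-append fold (append `d` iff it is not yet present). -/
def dedupF (acc : List String) (l : List String) : List String :=
  l.foldl (fun acc d => if !(acc.contains d) then acc ++ [d] else acc) acc

lemma dedupF_cons (acc : List String) (d : String) (t : List String) :
    dedupF acc (d :: t) = dedupF (if !(acc.contains d) then acc ++ [d] else acc) t := rfl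

lemma dedupF_append (acc l1 l2 : List String) :
    dedupF acc (l1 ++ l2) = dedupF (dedupF acc l1) l2 := by
  simp [dedupF, List.foldl_append]

lemma mem_dedupF_of_mem {x : String} {acc : List String} (l : List String) (h : x ∈ acc) :
    x ∈ dedupF acc l := by
  induction l generalizing acc with
  | nil => exact h
  | cons d t ih =>
    rw [dedupF_cons]
    exact ih (by split <;> simp [h])

lemma mem_dedupF_self {d : String} {l : List String} (acc : List String) (h : d ∈ l) :
    d ∈ dedupF acc l := by
  induction l generalizing acc with
  | nil => simp at h
  | cons e t ih =>
    rw [dedupF_cons]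
    rcases List.mem_cons.1 h with rfl | h'
    · apply mem_dedupF_of_mem
      split
      · simp
      · rename_i hc; simp at hc; exact hc
    · exact ih _ h'

/-- A's guarded pass equals the dedup fold over the filtered list. -/
lemma guardedPass_eq_dedupF (p : String → Bool) (l acc : List String) :
    l.foldl (fun acc d => if p d && !(acc.contains d) then acc ++ [d] else acc) acc
      = dedupF acc (l.filter p) := by
  induction l generalizing acc with
  | nil => rfl
  | cons d t ih =>
    by_cases h : p d = true
    · simp only [List.foldl_cons, h, Bool.true_and, List.filter_cons_of_pos h, dedupF_cons]
      split <;> exact ih _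
    · have h' : p d = false := by simpa using h
      rw [List.foldl_cons, List.filter_cons_of_neg (by simp [h']), if_neg (by simp [h'])]
      exact ih _

/-- Elements already guaranteed present may be filtered out of a dedup fold. -/
lemma dedupF_filter_absorb (r : String → Bool) (l acc : List String)
    (h : ∀ d ∈ l, r d = true → d ∈ acc) :
    dedupF acc l = dedupF acc (l.filter (fun d => !(r d))) := by
  induction l generalizing acc with
  | nil => rfl
  | cons d t ih =>
    by_cases hr : r d = true
    · have hd : d ∈ acc := h d (by simp) hr
      rw [List.filter_cons_of_neg (by simp [hr]), dedupF_cons, if_neg (by simp [hd])]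
      exact ih _ (fun e he hre => h e (by simp [he]) hre)
    · rw [List.filter_cons_of_pos (by simp [hr]), dedupF_cons, dedupF_cons]
      apply ih
      intro e he hre
      have := h e (by simp [he]) hre
      split <;> simp [this]

/-- B's seen-set fold computes the same list as the dedup fold, given the invariant. -/
lemma seenFold_eq_dedupF (l : List String) (seen : PySem.Set String) (res : List String)
    (hinv : ∀ x, PySem.Set.contains seen x = res.contains x) :
    (l.foldl (fun (st : PySem.Set String × List String) drug =>
      if PySem.Set.contains st.1 drug then st
      else (PySem.Set.add st.1 drug, st.2 ++ [drug])) (seen, res)).2 = dedupF res l := by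
  induction l generalizing seen res with
  | nil => rfl
  | cons d t ih =>
    rw [List.foldl_cons, dedupF_cons]
    by_cases h : PySem.Set.contains seen d = true
    · have hres : d ∈ res := by simpa using (hinv d).symm.trans h
      rw [if_pos h, if_neg (by simp [hres])]
      exact ih _ _ hinv
    · simp only [Bool.not_eq_true] at h
      have hres : d ∉ res := by simpa using (hinv d).symm.trans h
      have hns : d ∉ seen := by simpa using h
      rw [if_neg (by simp [hns]), if_pos (by simp [hres])]
      have hadd : PySem.Set.add seen d = seen ++ [d] := by
        simp [PySem.Set.add, hns]
      rw [hadd]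
      apply ih
      intro x
      have hx : (x ∈ seen) ↔ (x ∈ res) := by simpa using hinv x
      simp [hx]

/-- The classification fold produces the three filters. -/
lemma bucketFold_eq_filters (p1 p2 p3 : String → Bool) (l : List String)
    (a b c : List String) :
    l.foldl (fun (st : List String × List String × List String) drug =>
      if p1 drug then (st.1 ++ [drug], st.2.1, st.2.2)
      else if p2 drug then (st.1, st.2.1 ++ [drug], st.2.2)
      else if p3 drug then (st.1, st.2.1, st.2.2 ++ [drug])
      else st) (a, b, c)
    = (a ++ l.filter p1, b ++ l.filter (fun d => !(p1 d) && p2 d),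
        c ++ l.filter (fun d => !(p1 d) && !(p2 d) && p3 d)) := by
  induction l generalizing a b c with
  | nil => simp
  | cons d t ih =>
    by_cases h1 : p1 d = true
    · simp [List.foldl_cons, h1, ih]
    · by_cases h2 : p2 d = true
      · simp [List.foldl_cons, h1, h2, ih]
      · by_cases h3 : p3 d = true <;>
          simp [List.foldl_cons, h1, h2, h3, ih]

/-- An exact (case-insensitive) match is also a prefix match. -/
lemma exact_imp_prefix (q d : String) (h : (PySem.Str.lower d == q) = true) :
    PySem.Str.startswith (PySem.Str.lower d) q = true := by
  have he : PySem.Str.lower d = q := by simpa using h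
  rw [he]
  simp only [PySem.Str.startswith_eq]
  exact (PySem.Chars.startswith_iff _ _).2 (List.prefix_refl _)

-- ===== VERDICT (by name: the statement is the Claim_ definition above) =====
theorem filter_drug_suggestions_spec : Claim_equal_filter_drug_suggestions := by
  unfold Claim_equal_filter_drug_suggestions
  intro query dl m _
  unfold Spec_filter_drug_suggestions filter_drug_suggestions filter_drug_suggestions_alt
  by_cases hq : query = ""
  · simp [hq]
  simp only [if_neg hq]
  set q := PySem.Str.lower query with hqdef
  set p1 : String → Bool := fun d => PySem.Str.lower d == q with hp1
  set p2 : String → Bool := fun d => PySem.Str.startswith (PySem.Str.lower d) q with hp2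
  set p3 : String → Bool := fun d => PySem.Str.isIn q (PySem.Str.lower d) with hp3
  -- normalize A's first pass to the Bool form
  have hfun1 : (fun (acc : List String) drug => if PySem.Str.lower drug = q then acc ++ [drug] else acc)
      = (fun acc drug => if p1 drug then acc ++ [drug] else acc) := by
    funext acc drug; simp [hp1]
  -- normalize B's classification function to the Bool form
  have hfun2 : (fun (b : List String × List String × List String) drug =>
        let dl := PySem.Str.lower drug
        if dl = q then (b.1 ++ [drug], b.2.1, b.2.2)
        else if PySem.Str.startswith dl q then (b.1, b.2.1 ++ [drug], b.2.2)
        else if PySem.Str.isIn q dl then (b.1, b.2.1, b.2.2 ++ [drug])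
        else b)
      = (fun b drug =>
        if p1 drug then (b.1 ++ [drug], b.2.1, b.2.2)
        else if p2 drug then (b.1, b.2.1 ++ [drug], b.2.2)
        else if p3 drug then (b.1, b.2.1, b.2.2 ++ [drug])
        else b) := by
    funext b drug; simp only [hp1, hp2, hp3, beq_iff_eq]
  rw [hfun1, foldl_filterAppend p1 dl [],
      guardedPass_eq_dedupF p2 dl, guardedPass_eq_dedupF p3 dl,
      hfun2, bucketFold_eq_filters p1 p2 p3 dl [] [] []]
  simp only [List.nil_append]
  set E := dl.filter p1 with hE
  -- B's dedup pass is the dedup fold starting from E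
  rw [seenFold_eq_dedupF _ (PySem.Set.ofList E) E
    (by intro x; simp [PySem.Set.mem_ofList])]
  -- A's second pass: exact matches are already in E, so they may be dropped
  have habs2 : dedupF E (dl.filter p2) = dedupF E (dl.filter (fun d => !(p1 d) && p2 d)) := by
    rw [dedupF_filter_absorb p1 _ E (by
      intro d hd h1
      exact List.mem_filter.2 ⟨(List.mem_filter.1 hd).1, h1⟩)]
    congr 1
    rw [List.filter_filter]
  -- A's third pass: prefix matches are already in the accumulator, so they may be dropped
  have habs3 : dedupF (dedupF E (dl.filter p2)) (dl.filter p3)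
      = dedupF (dedupF E (dl.filter p2)) (dl.filter (fun d => !(p1 d) && !(p2 d) && p3 d)) := by
    rw [dedupF_filter_absorb p2 _ _ (by
      intro d hd h2
      exact mem_dedupF_self _ (List.mem_filter.2 ⟨(List.mem_filter.1 hd).1, h2⟩))]
    congr 1
    rw [List.filter_filter]
    apply List.filter_congr
    intro d _
    by_cases h1 : p1 d = true
    · have h1' : (PySem.Str.lower d == q) = true := by rw [hp1] at h1; simpa using h1
      have h2 : p2 d = true := by rw [hp2]; simpa using exact_imp_prefix q d h1'
      simp [h1, h2]
    · by_cases h2 : p2 d = true <;> simp [h1, h2]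
  rw [habs3, habs2, ← dedupF_append]
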